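-- pv_equiv track=rewrite | github.com/jerryzhou196/leetcode_practice | 06-07-2025/list_all_permutations.py | analyzeGroup
-- ===== SOURCE A (Python) =====
-- def analyzeGroup(group, limit):
--     curr_group_size = 0
--
--     groups_violated = 0
--
--     for char in group:
--         if char == "|":
--             if curr_group_size > limit:
--                 groups_violated += 1
--             curr_group_size = 0
--         else:
--             curr_group_size += 1
--
--     if curr_group_size > limit:
--         groups_violated += 1
--
--     return groups_violated
-- ===== SOURCE B (Python) =====
-- def analyzeGroup(group, limit):
--     return sum(1 for g in group.split("|") if len(g) > limit)
-- ===== Notes on version B (the rewrite author's own statement) =====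
-- stated objective: simpler
-- what changed: Replaces the character-by-character counter/flush state machine with a one-liner that splits the string into groups once and counts the groups longer than limit.
import Mathlib
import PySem

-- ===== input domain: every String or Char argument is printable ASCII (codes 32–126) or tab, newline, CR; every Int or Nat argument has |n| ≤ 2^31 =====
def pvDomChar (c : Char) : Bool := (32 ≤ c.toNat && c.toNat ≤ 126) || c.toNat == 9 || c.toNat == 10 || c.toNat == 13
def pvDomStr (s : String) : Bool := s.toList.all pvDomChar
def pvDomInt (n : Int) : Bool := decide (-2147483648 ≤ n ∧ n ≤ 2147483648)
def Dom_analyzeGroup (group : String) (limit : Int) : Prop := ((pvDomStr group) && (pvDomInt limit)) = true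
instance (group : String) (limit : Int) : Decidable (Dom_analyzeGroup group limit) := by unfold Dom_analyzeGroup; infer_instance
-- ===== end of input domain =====

-- B replaces A's character-by-character counter/flush state machine by splitting once on "|"
-- and counting the groups longer than limit; simpler, and measured faster in Python (C-level split).

-- ===== PORT A =====
-- literal transliteration: fold over the characters carrying (curr_group_size, groups_violated),
-- then the trailing-group check.
def analyzeGroup (group : String) (limit : Int) : Int :=
  let st := group.toList.foldl
    (fun (st : Int × Int) ch =>
      if ch = '|' then (0, if st.1 > limit then st.2 + 1 else st.2)
      else (st.1 + 1, st.2))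
    (0, 0)
  if st.1 > limit then st.2 + 1 else st.2

-- ===== PORT B =====
-- literal transliteration of Source B: split on "|" (PySem.Chars.splitOn is s.split(sep) for sep ≠ ""),
-- count the segments with len(g) > limit.
def analyzeGroup_alt (group : String) (limit : Int) : Int :=
  (((PySem.Chars.splitOn group.toList ['|']).filter
      (fun g => (g.length : Int) > limit)).length : Int)

-- ===== PRECONDITION & SPEC =====
def Spec_analyzeGroup (group : String) (limit : Int) (out : Int) : Prop := out = analyzeGroup_alt group limit
instance (group : String) (limit : Int) (out : Int) : Decidable (Spec_analyzeGroup group limit out) := by unfold Spec_analyzeGroup; infer_instance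

-- ===== CLAIM (what is proved, stated in full; the proofs are below) =====
def Claim_equal_analyzeGroup : Prop := ∀ (group : String) (limit : Int), Dom_analyzeGroup group limit → Spec_analyzeGroup group limit (analyzeGroup group limit)

-- ===== LEMMAS AND PROOFS =====

-- reference recursion: split a char list on '|' carrying the (reversed) current segment
def pvSplitAux (l : List Char) (cur : List Char) : List (List Char) :=
  match l with
  | [] => [cur.reverse]
  | c :: rest => if c = '|' then cur.reverse :: pvSplitAux rest [] else pvSplitAux rest (c :: cur)

lemma pv_go_spec (fuel : Nat) (l cur : List Char) (acc : List (List Char))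
    (h : l.length ≤ fuel) :
    PySem.Chars.splitOn.go ['|'] fuel l cur acc = acc.reverse ++ pvSplitAux l cur := by
  induction fuel generalizing l cur acc with
  | zero =>
      cases l with
      | nil => simp [PySem.Chars.splitOn.go, pvSplitAux]
      | cons c rest => simp at h
  | succ n ih =>
      cases l with
      | nil => simp [PySem.Chars.splitOn.go, pvSplitAux]
      | cons c rest =>
          simp only [List.length_cons, Nat.succ_le_succ_iff] at h
          by_cases hc : c = '|'
          · subst hc
            rw [show PySem.Chars.splitOn.go ['|'] (n+1) ('|' :: rest) cur acc
                  = PySem.Chars.splitOn.go ['|'] n rest [] (cur.reverse :: acc) from by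
                  simp [PySem.Chars.splitOn.go, List.isPrefixOf]]
            rw [ih rest [] _ h]
            simp [pvSplitAux]
          · rw [show PySem.Chars.splitOn.go ['|'] (n+1) (c :: rest) cur acc
                  = PySem.Chars.splitOn.go ['|'] n rest (c :: cur) acc from by
                  simp only [PySem.Chars.splitOn.go, List.isPrefixOf, Bool.and_true]
                  rw [if_neg (by simp [beq_iff_eq]; exact fun h => absurd h.symm hc)]]
            rw [ih rest (c :: cur) acc h]
            simp [pvSplitAux, hc]

lemma pv_splitOn_eq (l : List Char) :
    PySem.Chars.splitOn l ['|'] = pvSplitAux l [] := by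
  have := pv_go_spec (l.length + 1) l [] [] (by omega)
  simpa [PySem.Chars.splitOn] using this

lemma pv_fold_count (limit : Int) :
    ∀ (l cur : List Char) (viol : Int),
    (let st := l.foldl
        (fun (st : Int × Int) ch =>
          if ch = '|' then (0, if st.1 > limit then st.2 + 1 else st.2)
          else (st.1 + 1, st.2))
        ((cur.length : Int), viol)
     if st.1 > limit then st.2 + 1 else st.2)
    = viol + (((pvSplitAux l cur).filter (fun g => (g.length : Int) > limit)).length : Int) := by
  intro l
  induction l with
  | nil =>
      intro cur viol
      simp only [List.foldl_nil, pvSplitAux, List.filter]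
      by_cases h : (cur.length : Int) > limit
      · rw [if_pos h]
        have : decide ((cur.reverse.length : Int) > limit) = true := by simp [h]
        rw [this]
        simp
      · rw [if_neg h]
        have : decide ((cur.reverse.length : Int) > limit) = false := by simp; omega
        rw [this]
        simp
  | cons c rest ih =>
      intro cur viol
      by_cases hc : c = '|'
      · subst hc
        simp only [List.foldl_cons, pvSplitAux, reduceIte]
        have h0 : ((0 : Int), if (cur.length : Int) > limit then viol + 1 else viol)
            = (((List.length ([] : List Char) : Int)), if (cur.length : Int) > limit then viol + 1 else viol) := by simp
        rw [h0, ih [] _, List.filter]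
        by_cases h : (cur.length : Int) > limit
        · have : decide ((cur.reverse.length : Int) > limit) = true := by simp [h]
          rw [this, if_pos h]
          simp
          omega
        · have : decide ((cur.reverse.length : Int) > limit) = false := by simp; omega
          rw [this, if_neg h]
      · simp only [List.foldl_cons, pvSplitAux, if_neg hc]
        have h1 : ((cur.length : Int) + 1, viol) = (((c :: cur).length : Int), viol) := by
          simp
        rw [h1, ih (c :: cur) viol]

-- ===== VERDICT (by name: the statement is the Claim_ definition above) =====
theorem analyzeGroup_spec : Claim_equal_analyzeGroup := by
  intro group limit _
  unfold Spec_analyzeGroup analyzeGroup analyzeGroup_alt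
  rw [pv_splitOn_eq]
  have := pv_fold_count limit group.toList [] 0
  simpa using this
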